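-- pv_equiv track=rewrite | github.com/travisnielsen/cadence | src/backend/nl2sql_controller/pipeline.py | _detect_group_scope
-- ===== SOURCE A (Python) =====
-- def _detect_group_scope(
--     user_query: str,
--     group_names: list[str],
-- ) -> str | None:
--     """Detect if the user query targets a specific group by name.
--
--     Performs case-insensitive substring matching of known group
--     names against the user query.  Returns the matching group
--     name or ``None`` when no scope is detected.
--     """
--     query_lower = user_query.lower()
--     # Match longest names first to avoid partial matches
--     for name in sorted(group_names, key=len, reverse=True):
--         if name.lower() in query_lower:
--             return name
--     return None
-- ===== SOURCE B (Python) =====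
-- def _detect_group_scope(
--     user_query: str,
--     group_names: list[str],
-- ) -> str | None:
--     query_lower = user_query.lower()
--     best = None
--     for name in group_names:
--         if (best is None or len(name) > len(best)) and name.lower() in query_lower:
--             best = name
--     return best
-- ===== Notes on version B (the rewrite author's own statement) =====
-- stated objective: alternative
-- what changed: B drops A's length-descending sort-and-scan entirely: one pass over the names keeps a running best, testing a name for substring match only when it is strictly longer than the current best, which reproduces A's stable-sort first-longest tie-breaking.
import Mathlib
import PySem

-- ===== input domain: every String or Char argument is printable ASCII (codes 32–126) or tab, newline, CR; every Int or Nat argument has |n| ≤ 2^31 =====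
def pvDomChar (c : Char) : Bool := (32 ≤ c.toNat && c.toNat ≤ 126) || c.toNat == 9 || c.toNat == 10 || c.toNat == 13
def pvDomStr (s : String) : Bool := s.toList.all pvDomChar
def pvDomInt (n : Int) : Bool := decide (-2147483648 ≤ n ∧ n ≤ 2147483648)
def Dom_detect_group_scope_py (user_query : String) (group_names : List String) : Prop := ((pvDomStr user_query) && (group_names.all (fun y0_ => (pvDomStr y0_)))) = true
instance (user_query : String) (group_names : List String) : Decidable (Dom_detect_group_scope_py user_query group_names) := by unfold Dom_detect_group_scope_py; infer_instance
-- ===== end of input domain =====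

-- B replaces A's length-descending stable sort-and-scan by a single sort-free pass that keeps the best (longest, earliest) match so far; return-value equivalence, no observable side effects.

-- ===== PORT A =====
def detect_group_scope_py (user_query : String) (group_names : List String) : Option String :=
  let query_lower := PySem.Str.lower user_query
  (PySem.List.sorted group_names PySem.Str.len true).find?
    (fun name => PySem.Str.isIn (PySem.Str.lower name) query_lower)

-- ===== PORT B =====
def detect_group_scope_py_alt (user_query : String) (group_names : List String) : Option String :=
  let query_lower := PySem.Str.lower user_query
  group_names.foldl
    (fun best name =>
      if ((match best with
           | none => true
           | some b => decide (PySem.Str.len b < PySem.Str.len name))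
          && PySem.Str.isIn (PySem.Str.lower name) query_lower)
      then some name else best)
    none

-- ===== PRECONDITION & SPEC =====
def Spec_detect_group_scope_py (user_query : String) (group_names : List String) (out : Option String) : Prop := out = detect_group_scope_py_alt user_query group_names
instance (user_query : String) (group_names : List String) (out : Option String) : Decidable (Spec_detect_group_scope_py user_query group_names out) := by unfold Spec_detect_group_scope_py; infer_instance

-- ===== CLAIM (what is proved, stated in full; the proofs are below) =====
def Claim_equal_detect_group_scope_py : Prop := ∀ (user_query : String) (group_names : List String), Dom_detect_group_scope_py user_query group_names → Spec_detect_group_scope_py user_query group_names (detect_group_scope_py user_query group_names)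

-- ===== LEMMAS AND PROOFS =====

-- On a key-descending list ys, inserting x before the first strictly smaller element
-- moves x past exactly the elements of key ≥ key x; its effect on the first match.
theorem find?_insertBy {α κ : Type} [LinearOrder κ] (key : α → κ) (p : α → Bool) (x : α) :
    ∀ (ys : List α), ys.Pairwise (fun a b => key b ≤ key a) →
    List.find? p (PySem.List.insertBy (fun a b => decide (key b < key a)) x ys) =
      (match List.find? p ys with
       | none => if p x then some x else none
       | some m => if p x && decide (key m < key x) then some x else some m) := by
  intro ys
  induction ys with
  | nil =>
      intro _
      cases hpx : p x <;> simp [PySem.List.insertBy, List.find?, hpx]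
  | cons y ys ih =>
      intro hpair
      rw [List.pairwise_cons] at hpair
      obtain ⟨hy, htail⟩ := hpair
      by_cases hlt : key y < key x
      · -- x goes in front of y
        have hins : PySem.List.insertBy (fun a b => decide (key b < key a)) x (y :: ys)
            = x :: y :: ys := by simp [PySem.List.insertBy, hlt]
        rw [hins, List.find?_cons]
        cases hfind : List.find? p (y :: ys) with
        | none =>
            cases hpx : p x <;> simp
        | some m =>
            have hm : m ∈ y :: ys := List.mem_of_find?_eq_some hfind
            have hmle : key m ≤ key y := by
              rcases List.mem_cons.mp hm with h | h
              · exact le_of_eq (by rw [h])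
              · exact hy m h
            have hmlt : key m < key x := lt_of_le_of_lt hmle hlt
            cases hpx : p x <;> simp [hmlt]
      · -- x goes after y
        have hins : PySem.List.insertBy (fun a b => decide (key b < key a)) x (y :: ys)
            = y :: PySem.List.insertBy (fun a b => decide (key b < key a)) x ys := by
          simp [PySem.List.insertBy, hlt]
        rw [hins]
        cases hpy : p y with
        | true =>
            have : ¬ key y < key x := hlt
            simp [List.find?, hpy, this]
        | false =>
            simp [List.find?, hpy, ih htail]

-- max? of a list with one element appended is one fold step on max? of the list.
theorem max?_append_singleton {α κ : Type} [LinearOrder κ] (key : α → κ) (l : List α) (x : α) :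
    PySem.List.max? (l ++ [x]) key =
      (match PySem.List.max? l key with
       | none => some x
       | some m => if key m < key x then some x else some m) := by
  simp only [PySem.List.max?, List.foldl_append]
  rfl

-- Central bridge: the first match of a length-descending stable sort equals the
-- first key-maximal element of the filtered list.
theorem find?_sorted_eq_max?_filter {α κ : Type} [LinearOrder κ] (key : α → κ) (p : α → Bool)
    (xs : List α) :
    List.find? p (PySem.List.sorted xs key true) = PySem.List.max? (xs.filter p) key := by
  induction xs using List.reverseRecOn with
  | nil => simp [PySem.List.sorted, PySem.List.max?]
  | append_singleton xs x ih =>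
      have hsorted : PySem.List.sorted (xs ++ [x]) key true
          = PySem.List.insertBy (fun a b => decide (key b < key a)) x
              (PySem.List.sorted xs key true) := by
        rw [PySem.List.sorted_rev_eq_foldl_insertBy, PySem.List.sorted_rev_eq_foldl_insertBy,
          List.foldl_append]
        rfl
      rw [hsorted,
        find?_insertBy key p x _ (PySem.List.sorted_pairwise_rev xs key), ih,
        List.filter_append]
      cases hpx : p x with
      | false =>
          cases hmax : PySem.List.max? (xs.filter p) key <;> simp [hpx, hmax]
      | true =>
          rw [show List.filter p [x] = [x] by simp [hpx], max?_append_singleton]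
          cases hmax : PySem.List.max? (xs.filter p) key with
          | none => simp
          | some m => by_cases hlt : key m < key x <;> simp [hlt]

-- The fold function of PySem.List.max?, named so the folds can be compared.
def maxStep {α κ : Type} [LT κ] [DecidableLT κ] (key : α → κ) : Option α → α → Option α :=
  fun acc x =>
    match acc with
    | none => some x
    | some m => if key m < key x then some x else some m

theorem max?_eq_foldl_maxStep {α κ : Type} [LT κ] [DecidableLT κ] (key : α → κ) (l : List α) :
    PySem.List.max? l key = l.foldl (maxStep key) none := rfl

-- The fold function of B's running-best loop.
def bestStep {α κ : Type} [LT κ] [DecidableLT κ] (key : α → κ) (p : α → Bool) :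
    Option α → α → Option α :=
  fun best x =>
    if ((match best with
         | none => true
         | some b => decide (key b < key x)) && p x)
    then some x else best

theorem bestStep_of_p_false {α κ : Type} [LT κ] [DecidableLT κ] (key : α → κ) (p : α → Bool)
    (acc : Option α) (x : α) (hpx : p x = false) : bestStep key p acc x = acc := by
  cases acc <;> simp [bestStep, hpx]

theorem bestStep_none {α κ : Type} [LT κ] [DecidableLT κ] (key : α → κ) (p : α → Bool)
    (x : α) (hpx : p x = true) : bestStep key p none x = some x := by
  simp [bestStep, hpx]

theorem bestStep_some {α κ : Type} [LT κ] [DecidableLT κ] (key : α → κ) (p : α → Bool)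
    (b x : α) (hpx : p x = true) :
    bestStep key p (some b) x = if key b < key x then some x else some b := by
  by_cases hlt : key b < key x <;> simp [bestStep, hpx, hlt]

-- B's running-best fold over xs equals the max? fold over the filtered list.
theorem foldl_bestStep_eq {α κ : Type} [LT κ] [DecidableLT κ] (key : α → κ) (p : α → Bool) :
    ∀ (xs : List α) (acc : Option α),
      xs.foldl (bestStep key p) acc = (xs.filter p).foldl (maxStep key) acc := by
  intro xs
  induction xs with
  | nil => intro acc; rfl
  | cons x xs ih =>
      intro acc
      rw [List.foldl_cons, List.filter_cons]
      cases hpx : p x with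
      | false =>
          rw [bestStep_of_p_false key p acc x hpx]
          simp only [Bool.false_eq_true, if_false]
          exact ih acc
      | true =>
          simp only [if_true]
          rw [List.foldl_cons]
          cases acc with
          | none =>
              rw [bestStep_none key p x hpx, show maxStep key none x = some x from rfl]
              exact ih _
          | some b =>
              rw [bestStep_some key p b x hpx,
                show maxStep key (some b) x = if key b < key x then some x else some b from rfl]
              by_cases hlt : key b < key x <;> simp only [hlt, if_true, if_false] <;> exact ih _

-- ===== VERDICT (by name: the statement is the Claim_ definition above) =====
theorem detect_group_scope_py_spec : Claim_equal_detect_group_scope_py := by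
  intro user_query group_names _
  unfold Spec_detect_group_scope_py detect_group_scope_py detect_group_scope_py_alt
  change (PySem.List.sorted group_names PySem.Str.len true).find?
      (fun name => PySem.Str.isIn (PySem.Str.lower name) (PySem.Str.lower user_query))
    = List.foldl
        (fun best name =>
          if ((match best with
               | none => true
               | some b => decide (PySem.Str.len b < PySem.Str.len name))
              && PySem.Str.isIn (PySem.Str.lower name) (PySem.Str.lower user_query))
          then some name else best)
        none group_names
  have hstep : (fun (best : Option String) (name : String) =>
      if ((match best with
           | none => true
           | some b => decide (PySem.Str.len b < PySem.Str.len name))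
          && PySem.Str.isIn (PySem.Str.lower name) (PySem.Str.lower user_query))
      then some name else best)
      = bestStep PySem.Str.len
          (fun name => PySem.Str.isIn (PySem.Str.lower name) (PySem.Str.lower user_query)) := by
    funext best name
    cases best <;> rfl
  rw [hstep, foldl_bestStep_eq, ← max?_eq_foldl_maxStep, find?_sorted_eq_max?_filter]
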